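-- pv_equiv track=rewrite | github.com/DavidLyon66/Heichalot-CMS | tools/lscms.py | extract_first_text_line
-- ===== SOURCE A (Python) =====
-- from typing import Iterable, List, Optional, Sequence, Tuple
--
-- def extract_first_text_line(text: str) -> Optional[str]:
--     in_yaml = False
--     for i, line in enumerate(text.splitlines()):
--         stripped = line.strip()
--         if i == 0 and stripped == "---":
--             in_yaml = True
--             continue
--         if in_yaml:
--             if stripped == "---":
--                 in_yaml = False
--             continue
--         if not stripped:
--             continue
--         if stripped.startswith("[") and stripped.endswith("]"):
--             continue
--         if stripped.startswith('"""'):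
--             continue
--         return stripped[:120]
--     return None
-- ===== SOURCE B (Python) =====
-- def _after_close(lines):
--     for k, line in enumerate(lines):
--         if line.strip() == "---":
--             return lines[k + 1:]
--     return None
--
--
-- def _first_text(lines):
--     for line in lines:
--         stripped = line.strip()
--         if not stripped:
--             continue
--         if stripped.startswith("[") and stripped.endswith("]"):
--             continue
--         if stripped.startswith('"""'):
--             continue
--         return stripped[:120]
--     return None
--
--
-- def extract_first_text_line(text):
--     lines = text.splitlines()
--     if lines and lines[0].strip() == "---":
--         body = _after_close(lines[1:])
--         if body is None:
--             return None
--         return _first_text(body)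
--     return _first_text(lines)
-- ===== Notes on version B (the rewrite author's own statement) =====
-- stated objective: simpler
-- what changed: Replaces the single stateful loop (enumerate index + in_yaml flag) by two explicit phases: a helper that drops an initial '---'-delimited frontmatter block (returning None if unterminated) and a plain body scan with only the text filters.
import Mathlib
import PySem

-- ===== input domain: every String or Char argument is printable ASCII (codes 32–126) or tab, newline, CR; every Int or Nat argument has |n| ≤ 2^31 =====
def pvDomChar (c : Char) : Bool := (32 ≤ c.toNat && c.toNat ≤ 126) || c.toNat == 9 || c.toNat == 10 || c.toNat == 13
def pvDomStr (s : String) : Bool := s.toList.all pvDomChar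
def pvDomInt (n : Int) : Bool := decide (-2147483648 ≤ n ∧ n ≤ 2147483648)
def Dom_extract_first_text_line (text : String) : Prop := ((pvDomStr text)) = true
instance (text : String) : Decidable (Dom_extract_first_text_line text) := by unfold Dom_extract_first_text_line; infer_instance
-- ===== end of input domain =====

-- B is a simpler two-phase decomposition: drop the frontmatter block, then scan the body; A = B everywhere.

-- ===== PORT A =====
-- A's single loop over enumerate(text.splitlines()) with the in_yaml flag.
def pvLoopA : List String → Nat → Bool → Option String
  | [], _, _ => none
  | line :: rest, i, in_yaml =>
    let stripped := PySem.Str.strip line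
    if i == 0 && stripped == "---" then pvLoopA rest (i + 1) true
    else if in_yaml then
      (if stripped == "---" then pvLoopA rest (i + 1) false else pvLoopA rest (i + 1) true)
    else if stripped == "" then pvLoopA rest (i + 1) in_yaml
    else if PySem.Str.startswith stripped "[" && PySem.Str.endswith stripped "]" then
      pvLoopA rest (i + 1) in_yaml
    else if PySem.Str.startswith stripped "\"\"\"" then pvLoopA rest (i + 1) in_yaml
    else some (PySem.Str.slice stripped none (some 120))

def extract_first_text_line (text : String) : Option String :=
  pvLoopA (PySem.Str.splitlines text) 0 false

-- ===== PORT B =====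
-- _after_close: scan for the closing '---'; return the lines after it, or none.
def pvAfterClose : List String → Option (List String)
  | [] => none
  | line :: rest =>
    if PySem.Str.strip line == "---" then some rest else pvAfterClose rest

-- _first_text: the body filters only.
def pvFirstText : List String → Option String
  | [] => none
  | line :: rest =>
    let stripped := PySem.Str.strip line
    if stripped == "" then pvFirstText rest
    else if PySem.Str.startswith stripped "[" && PySem.Str.endswith stripped "]" then
      pvFirstText rest
    else if PySem.Str.startswith stripped "\"\"\"" then pvFirstText rest
    else some (PySem.Str.slice stripped none (some 120))

def extract_first_text_line_alt (text : String) : Option String :=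
  let lines := PySem.Str.splitlines text
  match lines with
  | [] => pvFirstText lines
  | l :: rest =>
    if PySem.Str.strip l == "---" then
      match pvAfterClose rest with
      | none => none
      | some body => pvFirstText body
    else pvFirstText lines

-- ===== PRECONDITION & SPEC =====
def Spec_extract_first_text_line (text : String) (out : Option String) : Prop := out = extract_first_text_line_alt text
instance (text : String) (out : Option String) : Decidable (Spec_extract_first_text_line text out) := by unfold Spec_extract_first_text_line; infer_instance

-- ===== CLAIM (what is proved, stated in full; the proofs are below) =====
def Claim_equal_extract_first_text_line : Prop := ∀ (text : String), Dom_extract_first_text_line text → Spec_extract_first_text_line text (extract_first_text_line text)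

-- ===== LEMMAS AND PROOFS =====

-- with the flag down and i ≠ 0, A's loop is exactly the body scan
theorem pvLoopA_false (lines : List String) : ∀ i : Nat, i ≠ 0 →
    pvLoopA lines i false = pvFirstText lines := by
  induction lines with
  | nil => intro i _; rfl
  | cons l rest ih =>
    intro i hi
    simp only [pvLoopA, pvFirstText]
    have h0 : (i == 0) = false := by simpa using hi
    simp only [h0, Bool.false_and, Bool.false_eq_true, if_false]
    simp [ih (i + 1) (by omega)]

-- with the flag up and i ≠ 0, A's loop is "find the closing '---', then body scan"
theorem pvLoopA_true (lines : List String) : ∀ i : Nat, i ≠ 0 →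
    pvLoopA lines i true =
      (match pvAfterClose lines with
       | none => none
       | some body => pvFirstText body) := by
  induction lines with
  | nil => intro i _; rfl
  | cons l rest ih =>
    intro i hi
    simp only [pvLoopA, pvAfterClose]
    have h0 : (i == 0) = false := by simpa using hi
    simp only [h0, Bool.false_and, Bool.false_eq_true, if_false, if_true]
    by_cases hc : PySem.Str.strip l == "---"
    · simp [hc, pvLoopA_false rest (i + 1) (by omega)]
    · simp [hc, ih (i + 1) (by omega)]

-- ===== VERDICT (by name: the statement is the Claim_ definition above) =====
theorem extract_first_text_line_spec : Claim_equal_extract_first_text_line := by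
  intro text _
  unfold Spec_extract_first_text_line extract_first_text_line extract_first_text_line_alt
  cases hs : PySem.Str.splitlines text with
  | nil => rfl
  | cons l rest =>
    simp only []
    by_cases hc : PySem.Str.strip l == "---"
    · have : pvLoopA (l :: rest) 0 false = pvLoopA rest 1 true := by
        simp [pvLoopA, hc]
      rw [this, pvLoopA_true rest 1 (by omega)]
      simp [hc]
    · simp only [pvLoopA, pvFirstText]
      simp only [hc, Bool.false_eq_true, if_false]
      simp [pvLoopA_false rest 1 (by omega)]
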